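-- pv_equiv track=rewrite | github.com/su-jin02/CodingTest | 프로그래머스/2/70129. 이진 변환 반복하기/이진 변환 반복하기.py | solution
-- ===== SOURCE A (Python) =====
-- def solution(s):
--     answer = [0, 0]
--     def helper(s):
--         count0 = 0
--         count1 = 0
--         if s == '1':
--             return
--         else:
--             for i in s:
--                 if i == '0':
--                     count0 += 1
--                 else:
--                     count1 += 1
--
--             answer[0] += 1
--             answer[1] += count0
--             helper(binary(count1))
--
--     helper(s)
--     return answer
--
-- def binary(n):
--     res = []
--     while n>0:
--         res.insert(0,n%2)
--         n = n//2
--     return ''.join(map(str, res))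
-- ===== SOURCE B (Python) =====
-- def solution(s):
--     answer = [0, 0]
--     if s != '1':
--         ones = sum(ch != '0' for ch in s)
--         answer = [1, len(s) - ones]
--         n = ones
--         while n != 1:
--             answer[0] += 1
--             answer[1] += n.bit_length() - n.bit_count()
--             n = n.bit_count()
--     return answer
-- ===== Notes on version B (the rewrite author's own statement) =====
-- stated objective: alternative
-- what changed: Replaces A's recursive helper mutating a closure list plus a hand-rolled binary() string builder with a flat arithmetic while-loop on the count of ones, using bit_length/bit_count so no binary string is ever rebuilt after the first scan.
-- outside the precondition, e.g. on solution('0'): A raises RecursionError, B does not finish within the time limit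
import Mathlib
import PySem

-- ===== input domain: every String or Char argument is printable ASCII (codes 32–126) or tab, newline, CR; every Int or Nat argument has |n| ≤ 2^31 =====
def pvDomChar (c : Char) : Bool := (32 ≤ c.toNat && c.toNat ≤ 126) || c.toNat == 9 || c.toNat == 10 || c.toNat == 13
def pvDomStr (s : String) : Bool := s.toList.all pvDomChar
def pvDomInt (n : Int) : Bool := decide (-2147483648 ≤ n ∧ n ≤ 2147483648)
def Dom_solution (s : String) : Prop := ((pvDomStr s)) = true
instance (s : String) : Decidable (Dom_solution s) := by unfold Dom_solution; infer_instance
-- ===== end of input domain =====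

-- B replaces A's recursion-with-mutable-closure and hand-rolled binary() by a flat
-- arithmetic loop on the count of ones (bit_length/bit_count), never rebuilding strings.

-- ===== PORT A =====
-- while n>0: res.insert(0, n%2); n = n//2   (fuel n.toNat: n at least halves each step, so it suffices)
def binaryLoop : Nat → Int → List Int → List Int
  | 0, _, res => res
  | fuel+1, n, res =>
    if n > 0 then binaryLoop fuel (PySem.Int.floordiv n 2) (PySem.Int.mod n 2 :: res)
    else res

def binary (n : Int) : String :=
  PySem.Str.join "" ((binaryLoop n.toNat n []).map PySem.Int.toStr)

-- helper(s), with the mutable closure `answer` threaded as the Int × Int state;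
-- fuel s.length + 1 bounds the recursion depth on every input A terminates on
def helperA : Nat → String → Int × Int → Int × Int
  | 0, _, ans => ans
  | fuel+1, s, ans =>
    if s = "1" then ans
    else
      let cs := s.toList.foldl
        (fun (c : Int × Int) ch => if ch == '0' then (c.1 + 1, c.2) else (c.1, c.2 + 1)) (0, 0)
      helperA fuel (binary cs.2) (ans.1 + 1, ans.2 + cs.1)

def solution (s : String) : List Int :=
  let ans := helperA (s.toList.length + 1) s (0, 0)
  [ans.1, ans.2]

-- ===== PORT B =====
-- while n != 1: answer[0] += 1; answer[1] += n.bit_length() - n.bit_count(); n = n.bit_count()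
-- (fuel: the loop runs fewer than len(s) times whenever it terminates)
def loopB : Nat → Nat → Int × Int → Int × Int
  | 0, _, ans => ans
  | fuel+1, n, ans =>
    if n ≠ 1 then
      loopB fuel (PySem.Int.bitCount n)
        (ans.1 + 1, ans.2 + ((PySem.Int.bitLength n : Int) - (PySem.Int.bitCount n : Int)))
    else ans

def solution_alt (s : String) : List Int :=
  if s ≠ "1" then
    -- sum(ch != '0' for ch in s): a 0/1 sum, i.e. List.countP
    let ones : Nat := s.toList.countP (fun ch => ch != '0')
    let ans := loopB s.toList.length ones (1, (s.toList.length : Int) - (ones : Int))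
    [ans.1, ans.2]
  else [0, 0]

-- ===== PRECONDITION & SPEC =====
-- Pre_ excludes strings with no character other than '0' (all-zero or empty): there A's
-- recursion never terminates and Python raises RecursionError, so A returns nothing.
def Pre_solution (s : String) : Prop := (s.toList.any (fun c => c != '0')) = true
instance (s : String) : Decidable (Pre_solution s) := by unfold Pre_solution; infer_instance
def pvWitness_solution : String := "110010101001"
def Spec_solution (s : String) (out : List Int) : Prop := out = solution_alt s
instance (s : String) (out : List Int) : Decidable (Spec_solution s out) := by unfold Spec_solution; infer_instance

-- ===== CLAIM (what is proved, stated in full; the proofs are below) =====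
def Claim_equal_solution : Prop := ∀ (s : String), Dom_solution s → Pre_solution s → Spec_solution s (solution s)

-- ===== LEMMAS AND PROOFS =====

-- the character string binary(m) produces, described structurally
def bitsL : Nat → List Char
  | 0 => []
  | m+1 => bitsL ((m+1)/2) ++ [if (m+1) % 2 = 0 then '0' else '1']
decreasing_by exact Nat.div_lt_self (Nat.succ_pos m) (by norm_num)

lemma bitsL_pos (m : Nat) (hm : 0 < m) :
    bitsL m = bitsL (m/2) ++ [if m % 2 = 0 then '0' else '1'] := by
  obtain ⟨k, rfl⟩ := Nat.exists_eq_succ_of_ne_zero (Nat.pos_iff_ne_zero.mp hm)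
  rw [bitsL]

lemma binaryLoop_eq (m : Nat) : ∀ (fuel : Nat) (res : List Int), m ≤ fuel →
    binaryLoop fuel (m : Int) res =
      (bitsL m).map (fun c => if c = '0' then (0 : Int) else 1) ++ res := by
  induction m using Nat.strong_induction_on with
  | _ m ih =>
    intro fuel res hf
    cases m with
    | zero => cases fuel <;> simp [binaryLoop, bitsL]
    | succ k =>
      obtain ⟨f, rfl⟩ : ∃ f, fuel = f + 1 := ⟨fuel - 1, by omega⟩
      have hpos : (0:Int) < ((k+1 : Nat) : Int) := by positivity
      have hdiv : PySem.Int.floordiv ((k+1 : Nat) : Int) 2 = (((k+1)/2 : Nat) : Int) := by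
        exact_mod_cast PySem.Int.floordiv_natCast (k+1) 2
      have hmod : PySem.Int.mod ((k+1 : Nat) : Int) 2 = (((k+1) % 2 : Nat) : Int) := by
        exact_mod_cast PySem.Int.mod_natCast (k+1) 2
      have hrec := ih ((k+1)/2) (Nat.div_lt_self (Nat.succ_pos k) (by norm_num)) f
        ((((k+1) % 2 : Nat) : Int) :: res) (by omega)
      simp only [binaryLoop, if_pos hpos, hdiv, hmod, hrec, bitsL]
      have h2 : (k+1) % 2 = 0 ∨ (k+1) % 2 = 1 := by omega
      rcases h2 with h | h <;> simp [h]

lemma toList_binary (m : Nat) : (binary (m : Int)).toList = bitsL m := by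
  have : ∀ l : List Char, (l.map (fun c => if c = '0' then (0:Int) else 1)).map
      (fun d => (PySem.Int.toStr d).toList) = l.map (fun c => [if c = '0' then '0' else '1']) := by
    intro l
    induction l with
    | nil => rfl
    | cons c t iht =>
      simp only [List.map_cons, iht, List.cons.injEq, and_true]
      by_cases h : c = '0' <;> simp [h] <;> decide
  have hall : ∀ l : List Char, (∀ c ∈ l, c = '0' ∨ c = '1') →
      l.map (fun c => [if c = '0' then '0' else '1']) = l.map (fun c => [c]) := by
    intro l hl
    refine List.map_congr_left ?_
    intro c hc
    rcases hl c hc with h | h <;> simp [h]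
  have hmem : ∀ m : Nat, ∀ c ∈ bitsL m, c = '0' ∨ c = '1' := by
    intro m
    induction m using Nat.strong_induction_on with
    | _ m ih =>
      cases m with
      | zero => simp [bitsL]
      | succ k =>
        intro c hc
        rw [bitsL] at hc
        rcases List.mem_append.mp hc with h | h
        · exact ih _ (Nat.div_lt_self (Nat.succ_pos k) (by norm_num)) c h
        · simp at h; subst h; split <;> simp
  rw [binary, Int.toNat_natCast, binaryLoop_eq m m [] le_rfl, List.append_nil,
    PySem.Str.toList_join, List.map_map]
  show PySem.Chars.join "".toList _ = _
  rw [Function.comp_def, this, hall _ (hmem m)]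
  have : "".toList = ([] : List Char) := rfl
  rw [this, PySem.Chars.join_nil_singletons]

lemma length_bitsL (m : Nat) : (bitsL m).length = PySem.Int.bitLength (m : Int) := by
  induction m using Nat.strong_induction_on with
  | _ m ih =>
    cases m with
    | zero => simp [bitsL, PySem.Int.bitLength_zero]
    | succ k =>
      rw [bitsL, List.length_append, ih _ (Nat.div_lt_self (Nat.succ_pos k) (by norm_num)),
        PySem.Int.bitLength_natCast (Nat.succ_pos k)]
      simp

lemma countP_ones_bitsL (m : Nat) :
    (bitsL m).countP (fun c => c != '0') = PySem.Int.bitCount (m : Int) := by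
  induction m using Nat.strong_induction_on with
  | _ m ih =>
    cases m with
    | zero => simp [bitsL, PySem.Int.bitCount_zero]
    | succ k =>
      rw [bitsL, List.countP_append, ih _ (Nat.div_lt_self (Nat.succ_pos k) (by norm_num)),
        PySem.Int.bitCount_natCast (Nat.succ_pos k)]
      have h2 : (k+1) % 2 = 0 ∨ (k+1) % 2 = 1 := by omega
      rcases h2 with h | h <;> simp [h] <;> omega

lemma countP_zeros (l : List Char) :
    l.countP (fun c => c == '0') = l.length - l.countP (fun c => c != '0') := by
  have := List.length_eq_countP_add_countP (fun c => c == '0') (l := l)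
  have he : (fun c : Char => decide ¬(c == '0') = true) = (fun c : Char => c != '0') := by
    funext c; by_cases h : c = '0' <;> simp [h]
  rw [he] at this
  omega

lemma bitsL_eq_one_iff (m : Nat) : bitsL m = ['1'] ↔ m = 1 := by
  constructor
  · intro h
    cases m with
    | zero => simp [bitsL] at h
    | succ k =>
      cases k with
      | zero => rfl
      | succ j =>
        exfalso
        have hlen := congrArg List.length h
        rw [length_bitsL] at hlen
        simp only [List.length_singleton] at hlen
        have hb1 := PySem.Int.bitLength_natCast (m := j+2) (by omega)
        have hb2 := PySem.Int.bitLength_natCast (m := (j+2)/2) (by omega)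
        have hlen2 : PySem.Int.bitLength ((j+2 : Nat) : Int) = 1 := hlen
        omega
  · rintro rfl
    rw [bitsL_pos 1 Nat.one_pos]
    norm_num [bitsL]

-- A's character-counting fold, in closed form
lemma foldA_eq (l : List Char) (a b : Int) :
    l.foldl (fun (c : Int × Int) ch => if ch == '0' then (c.1 + 1, c.2) else (c.1, c.2 + 1)) (a, b)
      = (a + (l.countP (fun c => c == '0') : Int), b + (l.countP (fun c => c != '0') : Int)) := by
  induction l generalizing a b with
  | nil => simp
  | cons c t iht =>
    simp only [List.foldl_cons, List.countP_cons]
    by_cases h : c = '0'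
    · rw [if_pos (by simp [h]), iht]
      simp [h]
      omega
    · rw [if_neg (by simp [h]), iht]
      simp [h]
      omega

lemma binary_eq_one_iff (m : Nat) : (binary (m : Int) = "1") ↔ m = 1 := by
  rw [← String.toList_inj, toList_binary]
  exact bitsL_eq_one_iff m

-- the core correspondence: A's recursion on binary strings = B's arithmetic loop
lemma main_loop (fuel : Nat) : ∀ (m : Nat) (ans : Int × Int),
    helperA fuel (binary (m : Int)) ans = loopB fuel m ans := by
  induction fuel with
  | zero => intro m ans; rfl
  | succ f ih =>
    intro m ans
    rw [helperA, loopB]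
    by_cases h1 : m = 1
    · subst h1
      rw [if_pos ((binary_eq_one_iff 1).mpr rfl), if_neg (by simp)]
    · rw [if_neg (fun hc => h1 ((binary_eq_one_iff m).mp hc)), if_pos h1]
      have hcs : ((binary (m : Int)).toList.foldl
          (fun (c : Int × Int) ch => if ch == '0' then (c.1 + 1, c.2) else (c.1, c.2 + 1)) (0, 0))
          = (((PySem.Int.bitLength (m : Int) : Int) - (PySem.Int.bitCount (m : Int) : Int)),
             (PySem.Int.bitCount (m : Int) : Int)) := by
        rw [foldA_eq, toList_binary, countP_zeros, countP_ones_bitsL, length_bitsL]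
        have hle := PySem.Int.bitCount_le_bitLength ((m : Nat) : Int)
        simp only [Prod.mk.injEq]
        constructor <;> omega
      rw [hcs]
      have : ((PySem.Int.bitCount (m : Int) : Int)) = ((PySem.Int.bitCount (m : Int) : Nat) : Int) := rfl
      rw [this, ih (PySem.Int.bitCount (m : Int)) _]

-- ===== VERDICT (by name: the statement is the Claim_ definition above) =====
theorem solution_spec : Claim_equal_solution := by
  intro s _ _
  unfold Spec_solution solution solution_alt
  by_cases h1 : s = "1"
  · subst h1
    simp [helperA]
  · rw [if_pos h1]
    simp only [helperA, if_neg h1]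
    rw [foldA_eq]
    have hones : (s.toList.countP (fun c => c == '0') : Int)
        = (s.toList.length : Int) - (s.toList.countP (fun c => c != '0') : Int) := by
      rw [countP_zeros]
      have := List.length_eq_countP_add_countP (fun c : Char => c != '0') (l := s.toList)
      have hle : s.toList.countP (fun c => c != '0') ≤ s.toList.length := by omega
      push_cast [Nat.cast_sub hle]
      omega
    simp only [zero_add]
    rw [hones, main_loop]
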